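-- pv_equiv track=rewrite | github.com/JS12540/ScreenerClaw | backend/screener/result_formatter.py | _collect_data_cols
-- ===== SOURCE A (Python) =====
-- PRIORITY_ORDER = [
--     "current_price", "pe", "market_cap", "roce", "roe", "debt_to_equity",
--     "dividend_yield", "pb", "intrinsic_value", "book_value",
--     "sales_growth_5y", "profit_growth_5y", "return_1y",
--     "promoter_holding", "pledged_pct",
--     "sales_qtr", "profit_qtr", "piotroski",
-- ]
--
-- _SKIP_KEYS = frozenset({
--     "screener_company_id", "company_name", "ticker", "symbol", "bse_code",
--     "score", "verdict", "verdict_emoji",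
-- })
--
-- def _collect_data_cols(results: list[dict]) -> list[str]:
--     """
--     Discover all data columns present in the results, in priority order.
--     Unknown columns are appended alphabetically after known ones.
--     """
--     present: set[str] = set()
--     for r in results:
--         for k, v in r.items():
--             if k not in _SKIP_KEYS and v is not None:
--                 present.add(k)
--
--     ordered: list[str] = []
--     for col in PRIORITY_ORDER:
--         if col in present:
--             ordered.append(col)
--             present.discard(col)
--
--     # Append any remaining unknown columns alphabetically
--     for col in sorted(present):
--         ordered.append(col)
--
--     return ordered
-- ===== SOURCE B (Python) =====
-- PRIORITY_ORDER = [
--     "current_price", "pe", "market_cap", "roce", "roe", "debt_to_equity",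
--     "dividend_yield", "pb", "intrinsic_value", "book_value",
--     "sales_growth_5y", "profit_growth_5y", "return_1y",
--     "promoter_holding", "pledged_pct",
--     "sales_qtr", "profit_qtr", "piotroski",
-- ]
--
-- _SKIP_KEYS = frozenset({
--     "screener_company_id", "company_name", "ticker", "symbol", "bse_code",
--     "score", "verdict", "verdict_emoji",
-- })
--
--
-- def _collect_data_cols(results: list[dict]) -> list[str]:
--     """Discover all present data columns, priority-ranked then alphabetical."""
--     present: set[str] = set()
--     for r in results:
--         for k, v in r.items():
--             if k not in _SKIP_KEYS and v is not None:
--                 present.add(k)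
--
--     rank = {col: i for i, col in enumerate(PRIORITY_ORDER)}
--     unknown = len(PRIORITY_ORDER)
--     return sorted(present, key=lambda c: (rank.get(c, unknown), c))
-- ===== Notes on version B (the rewrite author's own statement) =====
-- stated objective: idiomatic
-- what changed: A's second phase (explicit priority loop appending+discarding, then a separate sorted() over the leftovers) is replaced by one composite-key sort of the collected set, keyed by (priority rank with unknowns ranked last, column name).
import Mathlib
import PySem

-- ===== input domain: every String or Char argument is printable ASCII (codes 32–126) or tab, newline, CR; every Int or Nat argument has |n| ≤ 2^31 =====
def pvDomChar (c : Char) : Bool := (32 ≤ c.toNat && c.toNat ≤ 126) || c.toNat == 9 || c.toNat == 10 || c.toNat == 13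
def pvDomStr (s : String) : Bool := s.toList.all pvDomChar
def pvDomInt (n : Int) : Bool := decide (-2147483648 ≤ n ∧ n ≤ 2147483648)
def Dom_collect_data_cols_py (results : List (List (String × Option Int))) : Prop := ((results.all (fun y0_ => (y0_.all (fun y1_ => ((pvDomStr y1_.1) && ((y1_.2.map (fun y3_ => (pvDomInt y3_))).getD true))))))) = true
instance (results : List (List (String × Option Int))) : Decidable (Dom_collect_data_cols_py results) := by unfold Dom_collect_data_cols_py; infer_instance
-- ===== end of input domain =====

-- B replaces A's explicit priority loop plus separate sorted() over leftovers by one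
-- composite-key sort (priority rank, then name) of the collected column set — idiomatic, same cost class.


-- ===== PORT A =====
def PRIORITY_ORDER_py : List String :=
  ["current_price", "pe", "market_cap", "roce", "roe", "debt_to_equity",
   "dividend_yield", "pb", "intrinsic_value", "book_value",
   "sales_growth_5y", "profit_growth_5y", "return_1y",
   "promoter_holding", "pledged_pct",
   "sales_qtr", "profit_qtr", "piotroski"]

def SKIP_KEYS_py : List String :=
  ["screener_company_id", "company_name", "ticker", "symbol", "bse_code",
   "score", "verdict", "verdict_emoji"]

def collect_data_cols_py (results : List (List (String × Option Int))) : List String :=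
  let present : PySem.Set String :=
    results.foldl (fun acc r =>
      r.foldl (fun acc kv =>
        if !(SKIP_KEYS_py.contains kv.1) && kv.2.isSome then PySem.Set.add acc kv.1 else acc) acc)
      PySem.Set.empty
  let st : List String × PySem.Set String :=
    PRIORITY_ORDER_py.foldl (fun st col =>
      if PySem.Set.contains st.2 col then (st.1 ++ [col], PySem.Set.discard st.2 col) else st)
      ([], present)
  st.1 ++ PySem.List.sorted st.2 (fun x => x) false

-- ===== PORT B =====
def collect_data_cols_py_alt (results : List (List (String × Option Int))) : List String :=
  let present : PySem.Set String :=
    results.foldl (fun acc r =>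
      r.foldl (fun acc kv =>
        if !(SKIP_KEYS_py.contains kv.1) && kv.2.isSome then PySem.Set.add acc kv.1 else acc) acc)
      PySem.Set.empty
  let rank : PySem.Dict String Int :=
    (PySem.List.enumerate PRIORITY_ORDER_py 0).foldl (fun d p => d.insert p.2 p.1) PySem.Dict.empty
  let unknown : Int := (PRIORITY_ORDER_py.length : Int)
  PySem.List.sorted2 present (fun c => rank.getD c unknown) (fun c => c) false

-- ===== PRECONDITION & SPEC =====
def Spec_collect_data_cols_py (results : List (List (String × Option Int))) (out : List String) : Prop := out = collect_data_cols_py_alt results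
instance (results : List (List (String × Option Int))) (out : List String) : Decidable (Spec_collect_data_cols_py results out) := by unfold Spec_collect_data_cols_py; infer_instance

-- ===== CLAIM (what is proved, stated in full; the proofs are below) =====
def Claim_equal_collect_data_cols_py : Prop := ∀ (results : List (List (String × Option Int))), Dom_collect_data_cols_py results → Spec_collect_data_cols_py results (collect_data_cols_py results)

-- ===== LEMMAS AND PROOFS =====

-- The rank dictionary of port B, as a closed term.
def pvRank : PySem.Dict String Int :=
  (PySem.List.enumerate PRIORITY_ORDER_py 0).foldl (fun d p => d.insert p.2 p.1) PySem.Dict.empty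

lemma pvRank_keys : pvRank.keys = PRIORITY_ORDER_py := by decide

lemma pvRank_pairwise :
    List.Pairwise (fun a b => pvRank.getD a 18 < pvRank.getD b 18) PRIORITY_ORDER_py := by decide

lemma pvRank_lt_of_mem {c : String} (h : c ∈ PRIORITY_ORDER_py) : pvRank.getD c 18 < 18 := by
  fin_cases h <;> decide

lemma pvRank_of_not_mem {c : String} (h : c ∉ PRIORITY_ORDER_py) : pvRank.getD c 18 = 18 := by
  apply PySem.Dict.getD_of_not_contains
  rw [← Bool.not_eq_true]
  intro hc
  exact h (pvRank_keys ▸ (PySem.Dict.contains_iff_mem_keys pvRank c).mp hc)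

lemma priority_nodup : PRIORITY_ORDER_py.Nodup := by decide

-- The nested set-building loop produces a Nodup list.
lemma present_nodup (results : List (List (String × Option Int))) :
    (results.foldl (fun acc r =>
      r.foldl (fun acc kv =>
        if !(SKIP_KEYS_py.contains kv.1) && kv.2.isSome then PySem.Set.add acc kv.1 else acc) acc)
      PySem.Set.empty).Nodup := by
  have inner : ∀ (r : List (String × Option Int)) (acc : PySem.Set String), acc.Nodup →
      (r.foldl (fun acc kv =>
        if !(SKIP_KEYS_py.contains kv.1) && kv.2.isSome then PySem.Set.add acc kv.1 else acc) acc).Nodup := by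
    intro r
    induction r with
    | nil => intro acc h; exact h
    | cons kv r ih =>
        intro acc h
        simp only [List.foldl_cons]
        split
        · exact ih _ (PySem.Set.nodup_add _ _ h)
        · exact ih _ h
  have outer : ∀ (rs : List (List (String × Option Int))) (acc : PySem.Set String), acc.Nodup →
      (rs.foldl (fun acc r =>
        r.foldl (fun acc kv =>
          if !(SKIP_KEYS_py.contains kv.1) && kv.2.isSome then PySem.Set.add acc kv.1 else acc) acc) acc).Nodup := by
    intro rs
    induction rs with
    | nil => intro acc h; exact h
    | cons r rs ih => intro acc h; exact ih _ (inner r acc h)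
  exact outer results PySem.Set.empty List.nodup_nil

-- A's priority loop, characterised.
lemma loopA (p : List String) (hp : p.Nodup) (acc s : List String) :
    p.foldl (fun st col =>
      if PySem.Set.contains st.2 col then (st.1 ++ [col], PySem.Set.discard st.2 col) else st)
      (acc, s)
    = (acc ++ p.filter (fun c => s.contains c), s.filter (fun c => !p.contains c)) := by
  induction p generalizing acc s with
  | nil => simp
  | cons c p ih =>
      have hcp : c ∉ p := (List.nodup_cons.mp hp).1
      have hp' : p.Nodup := (List.nodup_cons.mp hp).2
      simp only [List.foldl_cons]
      by_cases hcs : c ∈ s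
      · rw [if_pos (by simpa using hcs)]
        rw [ih hp']
        refine Prod.ext ?_ ?_
        · show acc ++ [c] ++ _ = acc ++ _
          rw [List.append_assoc]
          congr 1
          rw [List.filter_cons_of_pos (by simpa using hcs)]
          show c :: _ = c :: _
          congr 1
          apply List.filter_congr
          intro d hd
          have hdc : d ≠ c := fun h => hcp (h ▸ hd)
          show (PySem.Set.discard s c).contains d = s.contains d
          simp [PySem.Set.discard, List.mem_filter, hdc]
        · show (PySem.Set.discard s c).filter _ = s.filter _
          simp only [PySem.Set.discard, List.filter_filter]
          apply List.filter_congr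
          intro d _
          simp [Bool.not_or, Bool.beq_eq_decide_eq, eq_comm, Bool.and_comm]
      · rw [if_neg (by simpa using hcs)]
        rw [ih hp']
        refine Prod.ext ?_ ?_
        · show acc ++ _ = acc ++ _
          congr 1
          rw [List.filter_cons_of_neg (by simpa using hcs)]
        · apply List.filter_congr
          intro d hd
          have hdc : d ≠ c := fun h => hcs (h ▸ hd)
          simp [hdc]

-- The composite-key sort equals a single sort under the lexicographic key.
lemma sorted2_eq_sorted_lex (xs : List String) (k1 : String → Int) :
    PySem.List.sorted2 xs k1 (fun c => c) false
      = PySem.List.sorted xs (fun c => toLex (k1 c, c)) false := by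
  unfold PySem.List.sorted2 PySem.List.sorted
  simp only []
  have h : (fun (a b : String) => decide (k1 a < k1 b) || (!decide (k1 b < k1 a) && decide (a < b)))
      = fun (a b : String) => decide (toLex (k1 a, a) < toLex (k1 b, b)) := by
    funext a b
    rw [Bool.eq_iff_iff]
    simp only [Prod.Lex.toLex_lt_toLex, Bool.or_eq_true, decide_eq_true_eq, Bool.and_eq_true,
      Bool.not_eq_true', decide_eq_false_iff_not]
    constructor
    · rintro (h | ⟨h1, h2⟩)
      · exact Or.inl h
      · rcases lt_or_eq_of_le (not_lt.mp h1) with h3 | h3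
        · exact Or.inl h3
        · exact Or.inr ⟨h3, h2⟩
    · rintro (h | ⟨h1, h2⟩)
      · exact Or.inl h
      · exact Or.inr ⟨by rw [h1]; exact lt_irrefl _, h2⟩
  rw [h]
  rfl

-- The main ordering argument: A's output is a strictly key-increasing rearrangement of s.
lemma main_sorted (s : List String) (hs : s.Nodup) :
    PySem.List.sorted s (fun c => toLex (pvRank.getD c 18, c)) false
      = PRIORITY_ORDER_py.filter (fun c => s.contains c)
        ++ PySem.List.sorted (s.filter (fun c => !PRIORITY_ORDER_py.contains c)) (fun x => x) false := by
  have hL : (s.filter (fun c => !PRIORITY_ORDER_py.contains c)).Nodup := hs.filter _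
  have hSnd : (PySem.List.sorted (s.filter (fun c => !PRIORITY_ORDER_py.contains c)) (fun x => x) false).Nodup :=
    ((PySem.List.sorted_perm _ _ _).nodup_iff).mpr hL
  have hSm : ∀ b ∈ PySem.List.sorted (s.filter (fun c => !PRIORITY_ORDER_py.contains c)) (fun x => x) false,
      b ∉ PRIORITY_ORDER_py := by
    intro b hb
    have := (PySem.List.sorted_perm _ _ _).mem_iff.mp hb
    have := (List.mem_filter.mp this).2
    simpa using this
  apply PySem.List.sorted_eq_of_perm_of_pairwise_lt
  · -- permutation with s
    have hF : (PRIORITY_ORDER_py.filter (fun c => s.contains c)).Perm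
        (s.filter (fun c => PRIORITY_ORDER_py.contains c)) := by
      rw [List.perm_ext_iff_of_nodup (priority_nodup.filter _) (hs.filter _)]
      intro a
      simp only [List.mem_filter]
      constructor
      · rintro ⟨h1, h2⟩; exact ⟨by simpa using h2, by simpa using h1⟩
      · rintro ⟨h1, h2⟩; exact ⟨by simpa using h2, by simpa using h1⟩
    exact (hF.append (PySem.List.sorted_perm _ _ _)).trans
      (List.filter_append_perm (fun c => PRIORITY_ORDER_py.contains c) s)
  · -- strictly increasing under the lexicographic key
    rw [List.pairwise_append]
    refine ⟨?_, ?_, ?_⟩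
    · refine (pvRank_pairwise.sublist List.filter_sublist).imp ?_
      intro a b h
      exact Prod.Lex.toLex_lt_toLex.mpr (Or.inl h)
    · have hle := PySem.List.sorted_pairwise (s.filter (fun c => !PRIORITY_ORDER_py.contains c)) (fun x => x)
      refine (hle.and hSnd).imp_of_mem ?_
      intro a b ha hb h
      refine Prod.Lex.toLex_lt_toLex.mpr (Or.inr ?_)
      rw [pvRank_of_not_mem (hSm a ha), pvRank_of_not_mem (hSm b hb)]
      exact ⟨rfl, lt_of_le_of_ne h.1 h.2⟩
    · intro a ha b hb
      have haP : a ∈ PRIORITY_ORDER_py := (List.mem_filter.mp ha).1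
      refine Prod.Lex.toLex_lt_toLex.mpr (Or.inl ?_)
      rw [pvRank_of_not_mem (hSm b hb)]
      exact pvRank_lt_of_mem haP

-- ===== VERDICT (by name: the statement is the Claim_ definition above) =====
theorem collect_data_cols_py_spec : Claim_equal_collect_data_cols_py := by
  intro results _
  unfold Spec_collect_data_cols_py collect_data_cols_py collect_data_cols_py_alt
  simp only []
  rw [loopA PRIORITY_ORDER_py priority_nodup, sorted2_eq_sorted_lex]
  show _ = PySem.List.sorted _ (fun c => toLex (pvRank.getD c 18, c)) false
  rw [main_sorted _ (present_nodup results)]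
  simp
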